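-- pv_equiv track=rewrite | github.com/bobhzhang/pyblish | plugins/collect/collect_rigs.py | determine_rig_group_name
-- ===== SOURCE A (Python) =====
-- def determine_rig_group_name(root_joint):
--     """Determine rig group name based on root joint name."""
--     joint_name = root_joint.split('|')[-1]
--
--     # Common rig naming patterns
--     if any(keyword in joint_name.lower() for keyword in ['character', 'char', 'hero']):
--         return 'CharacterRig'
--     elif any(keyword in joint_name.lower() for keyword in ['face', 'facial']):
--         return 'FacialRig'
--     elif any(keyword in joint_name.lower() for keyword in ['hand', 'finger']):
--         return 'HandRig'
--     elif any(keyword in joint_name.lower() for keyword in ['spine', 'back']):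
--         return 'SpineRig'
--     elif any(keyword in joint_name.lower() for keyword in ['leg', 'foot']):
--         return 'LegRig'
--     elif any(keyword in joint_name.lower() for keyword in ['arm', 'shoulder']):
--         return 'ArmRig'
--     else:
--         # Extract name from joint (remove common suffixes)
--         clean_name = joint_name.replace('_jnt', '').replace('_joint', '').replace('Joint', '')
--         if '_' in clean_name:
--             clean_name = clean_name.split('_')[0]
--         return f"{clean_name.capitalize()}Rig"
-- ===== SOURCE B (Python) =====
-- # Position-scan rewrite: instead of six chained any(kw in ...) membership tests,
-- # scan the lowered name once position by position, checking which keywords start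
-- # at each position, and keep the best (lowest) priority rank seen; the
-- # suffix-stripping fallback is unchanged.
-- _KEYWORD_RANK = {
--     'character': 0, 'char': 0, 'hero': 0,
--     'face': 1, 'facial': 1,
--     'hand': 2, 'finger': 2,
--     'spine': 3, 'back': 3,
--     'leg': 4, 'foot': 4,
--     'arm': 5, 'shoulder': 5,
-- }
-- _GROUPS = ['CharacterRig', 'FacialRig', 'HandRig', 'SpineRig', 'LegRig', 'ArmRig']
--
--
-- def determine_rig_group_name(root_joint):
--     """Determine rig group name based on root joint name."""
--     joint_name = root_joint.split('|')[-1]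
--     lowered = joint_name.lower()
--     best = 6
--     for i in range(len(lowered)):
--         for kw, rank in _KEYWORD_RANK.items():
--             if rank < best and lowered.startswith(kw, i):
--                 best = rank
--     if best < 6:
--         return _GROUPS[best]
--     clean_name = joint_name.replace('_jnt', '').replace('_joint', '').replace('Joint', '')
--     if '_' in clean_name:
--         clean_name = clean_name.split('_')[0]
--     return f"{clean_name.capitalize()}Rig"
-- ===== Notes on version B (the rewrite author's own statement) =====
-- stated objective: alternative
-- what changed: Replaces the six chained any(keyword in name) membership tests with a single position-by-position scan of the lowered name that checks which keywords start at each index and keeps the minimum priority rank, indexing a group table at the end; the suffix-stripping fallback is unchanged.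
import Mathlib
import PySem

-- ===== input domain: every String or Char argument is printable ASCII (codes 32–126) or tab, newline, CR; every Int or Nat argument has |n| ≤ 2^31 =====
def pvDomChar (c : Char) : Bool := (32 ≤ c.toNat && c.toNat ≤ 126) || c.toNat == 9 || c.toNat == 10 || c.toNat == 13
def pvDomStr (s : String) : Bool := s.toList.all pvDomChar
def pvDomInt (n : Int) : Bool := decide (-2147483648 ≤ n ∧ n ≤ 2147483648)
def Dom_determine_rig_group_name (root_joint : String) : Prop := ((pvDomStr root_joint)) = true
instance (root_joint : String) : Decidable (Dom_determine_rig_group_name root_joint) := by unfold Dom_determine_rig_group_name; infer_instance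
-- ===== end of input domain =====

-- B replaces A's six chained any(keyword in name) tests by one position-by-position
-- scan of the lowered name keeping the minimum matched priority rank; the
-- suffix-stripping fallback is unchanged. Objective: alternative. A = B everywhere.

-- str.capitalize() for ASCII strings, used by both Pythons (PySem has no capitalize):
-- first char uppercased, the rest lowercased — exact on the ASCII domain.
def pyCapitalize (s : String) : String :=
  match s.toList with
  | [] => ""
  | c :: rest => String.ofList (PySem.Chars.upperChar c :: rest.map PySem.Chars.lowerChar)

-- ===== PORT A =====
def determine_rig_group_name (root_joint : String) : String :=
  -- split('|') always returns a non-empty list, so [-1] never raises; default never used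
  let joint_name := PySem.List.pyGetD (((PySem.Str.split? root_joint "|").getD [])) (-1) ""
  if ["character", "char", "hero"].any
      (fun kw => PySem.Str.isIn kw (PySem.Str.lower joint_name)) then
    "CharacterRig"
  else if ["face", "facial"].any
      (fun kw => PySem.Str.isIn kw (PySem.Str.lower joint_name)) then
    "FacialRig"
  else if ["hand", "finger"].any
      (fun kw => PySem.Str.isIn kw (PySem.Str.lower joint_name)) then
    "HandRig"
  else if ["spine", "back"].any
      (fun kw => PySem.Str.isIn kw (PySem.Str.lower joint_name)) then
    "SpineRig"
  else if ["leg", "foot"].any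
      (fun kw => PySem.Str.isIn kw (PySem.Str.lower joint_name)) then
    "LegRig"
  else if ["arm", "shoulder"].any
      (fun kw => PySem.Str.isIn kw (PySem.Str.lower joint_name)) then
    "ArmRig"
  else
    let clean_name :=
      PySem.Str.replace (PySem.Str.replace (PySem.Str.replace joint_name "_jnt" "") "_joint" "")
        "Joint" ""
    let clean_name :=
      if PySem.Str.isIn "_" clean_name then
        PySem.List.pyGetD (((PySem.Str.split? clean_name "_").getD [])) 0 ""
      else clean_name
    pyCapitalize clean_name ++ "Rig"

-- ===== PORT B =====
-- the _KEYWORD_RANK dict of Source B, in insertion order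
def kwRank : List (String × Nat) :=
  [ ("character", 0), ("char", 0), ("hero", 0)
  , ("face", 1), ("facial", 1)
  , ("hand", 2), ("finger", 2)
  , ("spine", 3), ("back", 3)
  , ("leg", 4), ("foot", 4)
  , ("arm", 5), ("shoulder", 5) ]

-- the _GROUPS list of Source B
def rigGroups : List String := ["CharacterRig", "FacialRig", "HandRig", "SpineRig", "LegRig", "ArmRig"]

-- the nested 'for i in range(len(lowered)): for kw, rank in _KEYWORD_RANK.items(): ...'
-- loops; lowered.startswith(kw, i) with 0 ≤ i is exactly 'kw is a prefix of lowered[i:]'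
def bestRank (lowered : List Char) : Nat :=
  (List.range lowered.length).foldl
    (fun best i =>
      kwRank.foldl
        (fun best kr =>
          if kr.2 < best ∧ PySem.Chars.startswith (lowered.drop i) kr.1.toList then kr.2 else best)
        best)
    6

def determine_rig_group_name_alt (root_joint : String) : String :=
  let joint_name := PySem.List.pyGetD (((PySem.Str.split? root_joint "|").getD [])) (-1) ""
  let lowered := (PySem.Str.lower joint_name).toList
  let best := bestRank lowered
  if best < 6 then rigGroups.getD best ""   -- _GROUPS[best]; best < 6 so always in range
  else
    let clean_name :=
      PySem.Str.replace (PySem.Str.replace (PySem.Str.replace joint_name "_jnt" "") "_joint" "")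
        "Joint" ""
    let clean_name :=
      if PySem.Str.isIn "_" clean_name then
        PySem.List.pyGetD (((PySem.Str.split? clean_name "_").getD [])) 0 ""
      else clean_name
    pyCapitalize clean_name ++ "Rig"

-- ===== PRECONDITION & SPEC =====
def Spec_determine_rig_group_name (root_joint : String) (out : String) : Prop := out = determine_rig_group_name_alt root_joint
instance (root_joint : String) (out : String) : Decidable (Spec_determine_rig_group_name root_joint out) := by unfold Spec_determine_rig_group_name; infer_instance

-- ===== CLAIM (what is proved, stated in full; the proofs are below) =====
def Claim_equal_determine_rig_group_name : Prop := ∀ (root_joint : String), Dom_determine_rig_group_name root_joint → Spec_determine_rig_group_name root_joint (determine_rig_group_name root_joint)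

-- ===== LEMMAS AND PROOFS =====

-- generic facts about a fold whose step never increases the accumulator
theorem foldl_step_le {β : Type} (L : List β) (g : β → Nat → Nat)
    (hg : ∀ x b, g x b ≤ b) (b : Nat) :
    L.foldl (fun b x => g x b) b ≤ b := by
  induction L generalizing b with
  | nil => simp
  | cons x xs ih => exact le_trans (ih (g x b)) (hg x b)

theorem foldl_step_sound {β : Type} (L : List β) (g : β → Nat → Nat)
    (Q : β → Nat → Prop) (hq : ∀ x b, g x b = b ∨ Q x (g x b)) (b : Nat) :
    L.foldl (fun b x => g x b) b = b ∨ ∃ x ∈ L, Q x (L.foldl (fun b x => g x b) b) := by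
  induction L generalizing b with
  | nil => simp
  | cons x xs ih =>
    simp only [List.foldl_cons]
    rcases ih (g x b) with h | ⟨y, hy, hQ⟩
    · rw [h]
      rcases hq x b with h2 | h2
      · exact Or.inl h2
      · exact Or.inr ⟨x, List.mem_cons_self, h2⟩
    · exact Or.inr ⟨y, List.mem_cons_of_mem _ hy, hQ⟩

theorem foldl_step_complete {β : Type} (L : List β) (g : β → Nat → Nat)
    (hg : ∀ x b, g x b ≤ b) (x : β) (hx : x ∈ L) (N : Nat) (hN : ∀ b, g x b ≤ N) (b : Nat) :
    L.foldl (fun b x => g x b) b ≤ N := by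
  induction L generalizing b with
  | nil => cases hx
  | cons y ys ih =>
    simp only [List.foldl_cons]
    rcases List.mem_cons.mp hx with rfl | hmem
    · exact le_trans (foldl_step_le ys g hg _) (hN b)
    · exact ih hmem _

-- the inner step of bestRank
def innerStep (lowered : List Char) (i : Nat) (best : Nat) : Nat :=
  kwRank.foldl
    (fun best kr =>
      if kr.2 < best ∧ PySem.Chars.startswith (lowered.drop i) kr.1.toList then kr.2 else best)
    best

theorem innerStep_le (lowered : List Char) (i b : Nat) : innerStep lowered i b ≤ b := by
  apply foldl_step_le
  intro kr b
  split_ifs with h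
  · exact Nat.le_of_lt h.1
  · exact le_rfl

theorem innerStep_sound (lowered : List Char) (i b : Nat) :
    innerStep lowered i b = b ∨
      ∃ kr ∈ kwRank, PySem.Chars.startswith (lowered.drop i) kr.1.toList = true ∧
        innerStep lowered i b = kr.2 := by
  have := foldl_step_sound kwRank
    (fun kr b => if kr.2 < b ∧ PySem.Chars.startswith (lowered.drop i) kr.1.toList then kr.2 else b)
    (fun kr v => PySem.Chars.startswith (lowered.drop i) kr.1.toList = true ∧ v = kr.2)
    (by
      intro kr b
      dsimp only
      split_ifs with h
      · exact Or.inr ⟨h.2, rfl⟩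
      · exact Or.inl rfl)
    b
  rcases this with h | ⟨kr, hmem, hsw, hv⟩
  · exact Or.inl h
  · exact Or.inr ⟨kr, hmem, hsw, hv⟩

theorem innerStep_complete (lowered : List Char) (i b : Nat) (kr : String × Nat)
    (hmem : kr ∈ kwRank) (hsw : PySem.Chars.startswith (lowered.drop i) kr.1.toList = true) :
    innerStep lowered i b ≤ kr.2 := by
  unfold innerStep
  refine foldl_step_complete _ _ ?_ kr hmem kr.2 ?_ b
  · intro kr b
    split_ifs with h
    · exact Nat.le_of_lt h.1
    · exact le_rfl
  · intro b
    split_ifs with h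
    · exact le_rfl
    · rcases Nat.lt_or_ge kr.2 b with hlt | hge
      · exact absurd ⟨hlt, hsw⟩ h
      · exact hge

-- C r lowered: some keyword of rank r occurs in lowered
def matchedRank (lowered : List Char) (r : Nat) : Prop :=
  ∃ kw : String, (kw, r) ∈ kwRank ∧ PySem.Chars.isIn kw.toList lowered = true

theorem startswith_drop_isIn (lowered : List Char) (i : Nat) (kw : List Char)
    (hsw : PySem.Chars.startswith (lowered.drop i) kw = true) :
    PySem.Chars.isIn kw lowered = true := by
  rw [← PySem.Chars.exists_prefix_drop_iff_isIn]
  exact ⟨i, (PySem.Chars.startswith_iff _ _).mp hsw⟩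

theorem isIn_exists_range (lowered : List Char) (kw : List Char) (hne : kw ≠ [])
    (hin : PySem.Chars.isIn kw lowered = true) :
    ∃ i ∈ List.range lowered.length, PySem.Chars.startswith (lowered.drop i) kw = true := by
  rcases (PySem.Chars.exists_prefix_drop_iff_isIn kw lowered).mpr hin with ⟨j, hj⟩
  refine ⟨j, List.mem_range.mpr ?_, (PySem.Chars.startswith_iff _ _).mpr hj⟩
  rcases Nat.lt_or_ge j lowered.length with h | h
  · exact h
  · exfalso
    have hdrop : lowered.drop j = [] := List.drop_eq_nil_of_le h
    rw [hdrop] at hj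
    exact hne (List.prefix_nil.mp hj)

theorem kwRank_rank_le (kr : String × Nat) (h : kr ∈ kwRank) : kr.2 ≤ 5 := by
  fin_cases h <;> simp

theorem kwRank_key_ne (kr : String × Nat) (h : kr ∈ kwRank) : kr.1.toList ≠ [] := by
  fin_cases h <;> simp

-- the characterisation of bestRank: minimum matched rank, 6 if none
theorem bestRank_le (lowered : List Char) (r : Nat) (h : matchedRank lowered r) :
    bestRank lowered ≤ r := by
  rcases h with ⟨kw, hmem, hin⟩
  rcases isIn_exists_range lowered kw.toList (kwRank_key_ne _ hmem) hin with ⟨i, hi, hsw⟩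
  exact foldl_step_complete _ _ (fun i b => innerStep_le lowered i b) i hi r
    (fun b => innerStep_complete lowered i b (kw, r) hmem hsw) 6

theorem bestRank_cases (lowered : List Char) :
    bestRank lowered = 6 ∨ matchedRank lowered (bestRank lowered) := by
  have := foldl_step_sound (List.range lowered.length)
    (fun i b => innerStep lowered i b)
    (fun i v => ∃ kr ∈ kwRank, PySem.Chars.startswith (lowered.drop i) kr.1.toList = true ∧ v = kr.2)
    (by intro i b; exact innerStep_sound lowered i b) 6
  rcases this with h | ⟨i, _, kr, hmem, hsw, hv⟩
  · exact Or.inl h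
  · refine Or.inr ⟨kr.1, ?_, startswith_drop_isIn lowered i kr.1.toList hsw⟩
    rw [show bestRank lowered = kr.2 from hv]
    exact hmem

-- link matchedRank to A's any-conditions
theorem matchedRank_iff (lowered : List Char) :
    (matchedRank lowered 0 ↔
        (["character", "char", "hero"].any (fun kw => PySem.Chars.isIn kw.toList lowered)) = true) ∧
    (matchedRank lowered 1 ↔
        (["face", "facial"].any (fun kw => PySem.Chars.isIn kw.toList lowered)) = true) ∧
    (matchedRank lowered 2 ↔
        (["hand", "finger"].any (fun kw => PySem.Chars.isIn kw.toList lowered)) = true) ∧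
    (matchedRank lowered 3 ↔
        (["spine", "back"].any (fun kw => PySem.Chars.isIn kw.toList lowered)) = true) ∧
    (matchedRank lowered 4 ↔
        (["leg", "foot"].any (fun kw => PySem.Chars.isIn kw.toList lowered)) = true) ∧
    (matchedRank lowered 5 ↔
        (["arm", "shoulder"].any (fun kw => PySem.Chars.isIn kw.toList lowered)) = true) := by
  unfold matchedRank kwRank
  refine ⟨?_, ?_, ?_, ?_, ?_, ?_⟩ <;>
    (simp only [List.mem_cons, List.not_mem_nil, or_false, Prod.mk.injEq, List.any_cons,
      List.any_nil, Bool.or_eq_true, Bool.or_false] <;>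
     constructor
     · rintro ⟨kw, hmem, hin⟩ <;> aesop
     · intro h <;> aesop)

-- ===== VERDICT (by name: the statement is the Claim_ definition above) =====
theorem bestRank_eq (lowered : List Char) :
    bestRank lowered =
      if (["character", "char", "hero"].any (fun kw => PySem.Chars.isIn kw.toList lowered)) = true then 0
      else if (["face", "facial"].any (fun kw => PySem.Chars.isIn kw.toList lowered)) = true then 1
      else if (["hand", "finger"].any (fun kw => PySem.Chars.isIn kw.toList lowered)) = true then 2
      else if (["spine", "back"].any (fun kw => PySem.Chars.isIn kw.toList lowered)) = true then 3
      else if (["leg", "foot"].any (fun kw => PySem.Chars.isIn kw.toList lowered)) = true then 4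
      else if (["arm", "shoulder"].any (fun kw => PySem.Chars.isIn kw.toList lowered)) = true then 5
      else 6 := by
  obtain ⟨hf0, hf1, hf2, hf3, hf4, hf5⟩ := matchedRank_iff lowered
  have hub : ∀ r, matchedRank lowered r → bestRank lowered ≤ r := fun r h => bestRank_le lowered r h
  have hc := bestRank_cases lowered
  generalize hg : bestRank lowered = v at hub hc ⊢
  split_ifs with b0 b1 b2 b3 b4 b5
  · have := hub 0 (hf0.mpr b0); omega
  · have hle := hub 1 (hf1.mpr b1)
    rcases hc with hc | hc
    · omega
    · interval_cases v
      · exact absurd (hf0.mp hc) b0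
      · rfl
  · have hle := hub 2 (hf2.mpr b2)
    rcases hc with hc | hc
    · omega
    · interval_cases v
      · exact absurd (hf0.mp hc) b0
      · exact absurd (hf1.mp hc) b1
      · rfl
  · have hle := hub 3 (hf3.mpr b3)
    rcases hc with hc | hc
    · omega
    · interval_cases v
      · exact absurd (hf0.mp hc) b0
      · exact absurd (hf1.mp hc) b1
      · exact absurd (hf2.mp hc) b2
      · rfl
  · have hle := hub 4 (hf4.mpr b4)
    rcases hc with hc | hc
    · omega
    · interval_cases v
      · exact absurd (hf0.mp hc) b0
      · exact absurd (hf1.mp hc) b1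
      · exact absurd (hf2.mp hc) b2
      · exact absurd (hf3.mp hc) b3
      · rfl
  · have hle := hub 5 (hf5.mpr b5)
    rcases hc with hc | hc
    · omega
    · interval_cases v
      · exact absurd (hf0.mp hc) b0
      · exact absurd (hf1.mp hc) b1
      · exact absurd (hf2.mp hc) b2
      · exact absurd (hf3.mp hc) b3
      · exact absurd (hf4.mp hc) b4
      · rfl
  · rcases hc with hc | hc
    · exact hc
    · have hle : v ≤ 5 := by
        rcases hc with ⟨kw, hmem, _⟩
        exact kwRank_rank_le (kw, v) hmem
      interval_cases v
      · exact absurd (hf0.mp hc) b0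
      · exact absurd (hf1.mp hc) b1
      · exact absurd (hf2.mp hc) b2
      · exact absurd (hf3.mp hc) b3
      · exact absurd (hf4.mp hc) b4
      · exact absurd (hf5.mp hc) b5

set_option maxHeartbeats 800000 in
theorem determine_rig_group_name_spec : Claim_equal_determine_rig_group_name := by
  intro root_joint _
  unfold Spec_determine_rig_group_name determine_rig_group_name determine_rig_group_name_alt
  generalize (PySem.List.pyGetD (((PySem.Str.split? root_joint "|").getD [])) (-1) "") = jn
  simp only [bestRank_eq, PySem.Str.isIn_eq]
  split_ifs <;> first | omega | rfl
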